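-- pv_equiv track=rewrite | github.com/lubaroli/AoC18 | puzzle2.py | count_x_repeated
-- ===== SOURCE A (Python) =====
-- from collections import defaultdict
--
-- def count_x_repeated(string, x=1):
--     cnt = defaultdict(int)
--     for c in string:
--         cnt[c] += 1
--     if x in cnt.values():
--         return True
--     else:
--         return False
-- ===== SOURCE B (Python) =====
-- def count_x_repeated(string, x=1):
--     # Sort the characters, then scan consecutive equal runs; any run of length x?
--     def scan(s):
--         if not s:
--             return False
--         run = 1
--         while run < len(s) and s[run] == s[0]:
--             run += 1
--         return run == x or scan(s[run:])
--     return scan(sorted(string))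
-- ===== Notes on version B (the rewrite author's own statement) =====
-- stated objective: alternative
-- what changed: B sorts the characters and scans consecutive equal runs (run-length after sorting) instead of building a hash count dictionary and testing membership in its values.
import Mathlib
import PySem

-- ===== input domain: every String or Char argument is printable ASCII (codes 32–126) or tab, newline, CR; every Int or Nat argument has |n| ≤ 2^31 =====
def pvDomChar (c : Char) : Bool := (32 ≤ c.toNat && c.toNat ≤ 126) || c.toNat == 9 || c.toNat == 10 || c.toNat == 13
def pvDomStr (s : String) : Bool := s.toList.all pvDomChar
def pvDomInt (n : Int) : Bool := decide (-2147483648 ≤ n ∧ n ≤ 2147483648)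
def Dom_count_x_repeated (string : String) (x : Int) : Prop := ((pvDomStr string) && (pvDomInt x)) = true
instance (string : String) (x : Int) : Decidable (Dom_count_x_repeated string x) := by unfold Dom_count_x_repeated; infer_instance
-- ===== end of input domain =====

-- B sorts the characters and scans consecutive equal runs instead of building a hash count; return value only.

-- ===== PORT A =====
-- cnt = defaultdict(int); for c in string: cnt[c] += 1; return x in cnt.values()
def count_x_repeated (string : String) (x : Int) : Bool :=
  let cnt : PySem.Dict Char Int :=
    string.toList.foldl (fun d c => d.modify c 0 (· + 1)) PySem.Dict.empty
  if cnt.values.contains x then true else false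

-- ===== PORT B =====
-- scan(s): run := number of leading chars equal to s[0] (the while loop), then
-- 'run == x or scan(s[run:])'; s[run:] is exactly dropping the leading run.
def pvScan (x : Int) : List Char → Bool
  | [] => false
  | c :: t =>
    let run : Nat := 1 + (t.takeWhile (fun d => d == c)).length
    ((run : Int) == x) || pvScan x (t.dropWhile (fun d => d == c))
termination_by s => s.length
decreasing_by
  simp only [List.length_cons]
  exact Nat.lt_succ_of_le (List.length_dropWhile_le _ _)

def count_x_repeated_alt (string : String) (x : Int) : Bool :=
  pvScan x (PySem.List.sorted string.toList (fun c => c) false)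

-- ===== PRECONDITION & SPEC =====
def Spec_count_x_repeated (string : String) (x : Int) (out : Bool) : Prop := out = count_x_repeated_alt string x
instance (string : String) (x : Int) (out : Bool) : Decidable (Spec_count_x_repeated string x out) := by unfold Spec_count_x_repeated; infer_instance

-- ===== CLAIM (what is proved, stated in full; the proofs are below) =====
def Claim_equal_count_x_repeated : Prop := ∀ (string : String) (x : Int), Dom_count_x_repeated string x → Spec_count_x_repeated string x (count_x_repeated string x)

-- ===== LEMMAS AND PROOFS =====

-- A returns true iff some character of the string occurs exactly x times.
lemma countA_iff (string : String) (x : Int) :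
    count_x_repeated string x = true ↔
      ∃ c ∈ string.toList, (string.toList.count c : Int) = x := by
  unfold count_x_repeated
  rw [show (string.toList.foldl (fun d c => d.modify c 0 (· + 1)) PySem.Dict.empty)
        = PySem.Dict.counter string.toList from (PySem.Dict.counter_eq_foldl _).symm]
  simp only [Bool.if_true_left, Bool.or_false]  -- `if b then true else false` = b (may need adjust)
  constructor
  · intro h
    have h' : x ∈ (PySem.Dict.counter string.toList).values := by
      simpa using h
    have : x ∈ ((PySem.Set.ofList string.toList).map
        (fun k => (string.toList.count k : Int))) := by
      have hv : (PySem.Dict.counter string.toList).values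
          = ((PySem.Set.ofList string.toList).map
              (fun k => (k, (string.toList.count k : Int)))).map (·.2) := by
        simp only [PySem.Dict.values, PySem.Dict.items_counter]
      rw [hv] at h'
      simpa [List.map_map, Function.comp] using h'
    rcases List.mem_map.mp this with ⟨k, hk, hkx⟩
    exact ⟨k, (PySem.Set.mem_ofList _ _).mp hk, hkx⟩
  · rintro ⟨c, hc, hx⟩
    have hv : (PySem.Dict.counter string.toList).values
        = ((PySem.Set.ofList string.toList).map
            (fun k => (k, (string.toList.count k : Int)))).map (·.2) := by
      simp only [PySem.Dict.values, PySem.Dict.items_counter]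
    have : x ∈ (PySem.Dict.counter string.toList).values := by
      rw [hv]
      refine List.mem_map.mpr ⟨(c, (string.toList.count c : Int)), ?_, by simpa using hx⟩
      exact List.mem_map.mpr ⟨c, (PySem.Set.mem_ofList _ _).mpr hc, rfl⟩
    simpa using this

-- every element of dropWhile (== c) of the tail of a sorted list is > c
lemma lt_of_mem_dropWhile (c : Char) (t : List Char)
    (h : (c :: t).Pairwise (· ≤ ·)) :
    ∀ e ∈ t.dropWhile (fun d => d == c), c < e := by
  induction t with
  | nil => simp
  | cons a t' ih =>
    intro e he
    by_cases hac : (a == c) = true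
    · rw [List.dropWhile_cons, if_pos hac] at he
      have hac' : a = c := by simpa using hac
      subst hac'
      have h' : (a :: t').Pairwise (· ≤ ·) := by
        rcases List.pairwise_cons.mp h with ⟨h1, h2⟩
        rcases List.pairwise_cons.mp h2 with ⟨h3, h4⟩
        exact List.pairwise_cons.mpr ⟨h3, h4⟩
      exact ih h' e he
    · rw [List.dropWhile_cons, if_neg hac] at he
      rcases List.pairwise_cons.mp h with ⟨h1, h2⟩
      rcases List.pairwise_cons.mp h2 with ⟨h3, _⟩
      have hca : c < a := lt_of_le_of_ne (h1 a (by simp)) (by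
        intro hh; exact hac (by simp [hh.symm]))
      rcases List.mem_cons.mp he with he | he
      · simpa [he] using hca
      · exact lt_of_lt_of_le hca (h3 e he)

lemma count_head_sorted (c : Char) (t : List Char)
    (h : (c :: t).Pairwise (· ≤ ·)) :
    (c :: t).count c = 1 + (t.takeWhile (fun d => d == c)).length := by
  have hsplit : t = t.takeWhile (fun d => d == c) ++ t.dropWhile (fun d => d == c) :=
    (List.takeWhile_append_dropWhile).symm
  have htake : (t.takeWhile (fun d => d == c)).count c
      = (t.takeWhile (fun d => d == c)).length := by
    apply List.count_eq_length.mpr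
    intro a ha
    have h1 := List.mem_takeWhile_imp ha
    exact (beq_iff_eq.mp h1).symm
  have hdrop : (t.dropWhile (fun d => d == c)).count c = 0 :=
    List.count_eq_zero.mpr (fun hmem => lt_irrefl c (lt_of_mem_dropWhile c t h c hmem))
  rw [List.count_cons_self]
  conv_lhs => rw [hsplit]
  rw [List.count_append, htake, hdrop]
  omega

lemma count_mem_drop_sorted (c : Char) (t : List Char) (d : Char)
    (h : (c :: t).Pairwise (· ≤ ·))
    (hd : d ∈ t.dropWhile (fun e => e == c)) :
    (c :: t).count d = (t.dropWhile (fun e => e == c)).count d := by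
  have hcd : c < d := lt_of_mem_dropWhile c t h d hd
  have hsplit : t = t.takeWhile (fun e => e == c) ++ t.dropWhile (fun e => e == c) :=
    (List.takeWhile_append_dropWhile).symm
  have htake : (t.takeWhile (fun e => e == c)).count d = 0 := by
    apply List.count_eq_zero.mpr
    intro hmem
    have h1 := List.mem_takeWhile_imp hmem
    exact hcd.ne' (beq_iff_eq.mp h1)
  rw [List.count_cons_of_ne hcd.ne]
  conv_lhs => rw [hsplit]
  rw [List.count_append, htake]
  omega

lemma pairwise_drop (c : Char) (t : List Char)
    (h : (c :: t).Pairwise (· ≤ ·)) :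
    (t.dropWhile (fun d => d == c)).Pairwise (· ≤ ·) :=
  List.Pairwise.sublist (List.dropWhile_sublist _) ((List.pairwise_cons.mp h).2)

-- B's scan over a sorted list finds exactly the multiplicities.
lemma pvScan_iff (x : Int) (s : List Char) (h : s.Pairwise (· ≤ ·)) :
    pvScan x s = true ↔ ∃ c ∈ s, (s.count c : Int) = x := by
  induction s using pvScan.induct with
  | case1 => simp [pvScan]
  | case2 c t ih =>
    rw [pvScan]
    simp only [Bool.or_eq_true, beq_iff_eq]
    have hdroppw := pairwise_drop c t h
    rw [ih hdroppw]
    constructor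
    · rintro (hx | ⟨d, hd, hdx⟩)
      · refine ⟨c, by simp, ?_⟩
        rw [count_head_sorted c t h]
        exact_mod_cast hx
      · exact ⟨d, by
          right
          exact (List.dropWhile_sublist _).subset hd,
          by rw [count_mem_drop_sorted c t d h hd]; exact hdx⟩
    · rintro ⟨d, hd, hdx⟩
      by_cases hdc : d = c
      · left
        subst hdc
        rw [count_head_sorted d t h] at hdx
        exact_mod_cast hdx
      · right
        have hdT : d ∈ t := by
          rcases List.mem_cons.mp hd with hd | hd
          · exact absurd hd hdc
          · exact hd
        have hdrop : d ∈ t.dropWhile (fun e => e == c) := by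
          by_contra hnot
          have : d ∈ t.takeWhile (fun e => e == c) := by
            have hsplit : t = t.takeWhile (fun e => e == c) ++ t.dropWhile (fun e => e == c) :=
              (List.takeWhile_append_dropWhile).symm
            rw [hsplit] at hdT
            rcases List.mem_append.mp hdT with h1 | h1
            · exact h1
            · exact absurd h1 hnot
          have := List.mem_takeWhile_imp this
          exact hdc (by simpa using this)
        exact ⟨d, hdrop, by rw [← count_mem_drop_sorted c t d h hdrop]; exact hdx⟩

-- ===== VERDICT (by name: the statement is the Claim_ definition above) =====
theorem count_x_repeated_spec : Claim_equal_count_x_repeated := by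
  intro string x _
  unfold Spec_count_x_repeated
  rw [Bool.eq_iff_iff, countA_iff]
  unfold count_x_repeated_alt
  have hpw : (PySem.List.sorted string.toList (fun c => c) false).Pairwise (· ≤ ·) := by
    simpa using PySem.List.sorted_pairwise string.toList (fun c => c)
  rw [pvScan_iff x _ hpw]
  have hperm : (PySem.List.sorted string.toList (fun c => c) false).Perm string.toList :=
    PySem.List.sorted_perm _ _ _
  constructor
  · rintro ⟨c, hc, hx⟩
    exact ⟨c, hperm.mem_iff.mpr hc, by rw [hperm.count_eq]; exact hx⟩
  · rintro ⟨c, hc, hx⟩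
    exact ⟨c, hperm.mem_iff.mp hc, by rw [← hperm.count_eq]; exact hx⟩
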